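-- pv_equiv track=rewrite | github.com/daniellawson9999/merging-decision-transformers | decision-transformer/dt_utils.py | get_subset
-- ===== SOURCE A (Python) =====
-- def get_subset(names, exclude=None, include=None):
--     processed_names = []
--     if type(exclude) == str:
--         exclude = [exclude]
--     if type(include) == str:
--         include = [include]
--     if include is not None and len(include) == 0:
--         include = None
--     if exclude is not None and len(exclude) == 0:
--         exclude = None
--     if exclude is not None:
--         for name in names:
--             add = True
--             for e in exclude:
--                 if e in name:
--                     add = False
--                     break
--             if add:
--                 processed_names.append(name)
--         return processed_names
--     elif include is not None:
--         for name in names: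
--             for i in include:
--                 if i in name:
--                     processed_names.append(name)
--                     break
--         return processed_names
--     else:
--         return names
-- ===== SOURCE B (Python) =====
-- import re
--
--
-- def get_subset(names, exclude=None, include=None):
--     if type(exclude) == str:
--         exclude = [exclude]
--     if type(include) == str:
--         include = [include]
--     if include is not None and len(include) == 0:
--         include = None
--     if exclude is not None and len(exclude) == 0:
--         exclude = None
--     if exclude is not None:
--         pat = re.compile('|'.join(re.escape(e) for e in exclude))
--         return [n for n in names if not pat.search(n)]
--     elif include is not None:
--         pat = re.compile('|'.join(re.escape(i) for i in include))
--         return [n for n in names if pat.search(n)]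
--     else:
--         return names
-- ===== Notes on version B (the rewrite author's own statement) =====
-- stated objective: idiomatic
-- what changed: Replaces the nested per-name/per-pattern loops with flag-and-break by one compiled regex (alternation of escaped literal patterns) scanning each name once inside a list comprehension.
import Mathlib
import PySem

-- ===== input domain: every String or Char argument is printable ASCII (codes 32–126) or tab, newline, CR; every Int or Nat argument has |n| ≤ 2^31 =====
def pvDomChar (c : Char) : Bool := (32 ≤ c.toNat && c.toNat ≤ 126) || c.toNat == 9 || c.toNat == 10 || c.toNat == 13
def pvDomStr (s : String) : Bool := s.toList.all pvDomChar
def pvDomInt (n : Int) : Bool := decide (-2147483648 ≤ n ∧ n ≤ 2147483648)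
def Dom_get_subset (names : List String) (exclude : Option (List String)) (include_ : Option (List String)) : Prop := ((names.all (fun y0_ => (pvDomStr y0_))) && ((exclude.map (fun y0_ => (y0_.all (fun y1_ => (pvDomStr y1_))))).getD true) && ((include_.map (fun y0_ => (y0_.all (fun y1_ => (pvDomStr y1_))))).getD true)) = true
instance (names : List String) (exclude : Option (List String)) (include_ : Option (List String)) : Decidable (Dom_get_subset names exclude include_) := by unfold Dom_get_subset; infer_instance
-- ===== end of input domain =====

-- ===== PORT A =====
-- B replaces A's nested loops (flag + break) by one compiled literal-alternation regex
-- scanning each name in a comprehension; return value only (A may return the same list object).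
-- inner 'for e in exclude: if e in name: add = False; break' — returns the final 'add' flag
def pvExcludeAdd (exclude : List String) (name : String) : Bool :=
  match exclude with
  | [] => true
  | e :: rest => if PySem.Str.isIn e name then false else pvExcludeAdd rest name

-- inner 'for i in include: if i in name: append; break' — returns whether name was appended
def pvIncludeHit (include_ : List String) (name : String) : Bool :=
  match include_ with
  | [] => false
  | i :: rest => if PySem.Str.isIn i name then true else pvIncludeHit rest name

def get_subset (names : List String) (exclude : Option (List String)) (include_ : Option (List String)) : List String :=
  -- the 'type(...) == str' guards are vacuous under these types; normalize empty lists to None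
  let include_ := if include_ ≠ none ∧ (include_.getD []).length = 0 then none else include_
  let exclude := if exclude ≠ none ∧ (exclude.getD []).length = 0 then none else exclude
  match exclude with
  | some ex => names.foldl (fun acc name => if pvExcludeAdd ex name then acc ++ [name] else acc) []
  | none =>
    match include_ with
    | some inc => names.foldl (fun acc name => if pvIncludeHit inc name then acc ++ [name] else acc) []
    | none => names

-- ===== PORT B =====
-- pat.search(n) for pat = re.compile('|'.join(re.escape(e) for e in pats)) holds iff some
-- literal pattern is a substring of n — ported as that library call's contract
def pvRegexSearch (pats : List String) (n : String) : Bool :=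
  pats.any (fun p => PySem.Str.isIn p n)

def get_subset_alt (names : List String) (exclude : Option (List String)) (include_ : Option (List String)) : List String :=
  let include_ := if include_ ≠ none ∧ (include_.getD []).length = 0 then none else include_
  let exclude := if exclude ≠ none ∧ (exclude.getD []).length = 0 then none else exclude
  match exclude with
  | some ex => names.filter (fun n => !pvRegexSearch ex n)
  | none =>
    match include_ with
    | some inc => names.filter (fun n => pvRegexSearch inc n)
    | none => names

-- ===== PRECONDITION & SPEC =====
def Spec_get_subset (names : List String) (exclude : Option (List String)) (include_ : Option (List String)) (out : List String) : Prop := out = get_subset_alt names exclude include_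
instance (names : List String) (exclude : Option (List String)) (include_ : Option (List String)) (out : List String) : Decidable (Spec_get_subset names exclude include_ out) := by unfold Spec_get_subset; infer_instance

-- ===== CLAIM (what is proved, stated in full; the proofs are below) =====
def Claim_equal_get_subset : Prop := ∀ (names : List String) (exclude : Option (List String)) (include_ : Option (List String)), Dom_get_subset names exclude include_ → Spec_get_subset names exclude include_ (get_subset names exclude include_)

-- ===== LEMMAS AND PROOFS =====
theorem pvExcludeAdd_eq (ex : List String) (n : String) :
    pvExcludeAdd ex n = !pvRegexSearch ex n := by
  induction ex with
  | nil => rfl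
  | cons e rest ih =>
    cases h : PySem.Str.isIn e n <;>
      simp [pvExcludeAdd, pvRegexSearch, h, ih]

theorem pvIncludeHit_eq (inc : List String) (n : String) :
    pvIncludeHit inc n = pvRegexSearch inc n := by
  induction inc with
  | nil => rfl
  | cons i rest ih =>
    cases h : PySem.Str.isIn i n <;>
      simp [pvIncludeHit, pvRegexSearch, h, ih]

-- ===== VERDICT (by name: the statement is the Claim_ definition above) =====
theorem get_subset_spec : Claim_equal_get_subset := by
  intro names exclude include_ _
  unfold Spec_get_subset get_subset get_subset_alt
  cases hE : (if exclude ≠ none ∧ (exclude.getD []).length = 0 then none else exclude) with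
  | some ex =>
    simp only [pvExcludeAdd_eq, PySem.List.foldl_append_if_eq_filter, List.nil_append]
  | none =>
    cases hI : (if include_ ≠ none ∧ (include_.getD []).length = 0 then none else include_) with
    | some inc =>
      simp only [pvIncludeHit_eq, PySem.List.foldl_append_if_eq_filter, List.nil_append]
    | none => rfl
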